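-- pv_equiv track=rewrite | github.com/tgyuuAn/Algorithm | Find_prime_number_python.py | isbelong
-- ===== SOURCE A (Python) =====
-- def isbelong(n,numbers):
--     n=str(n)
--     visited = [[n,False] for n in numbers]
--
--     for i in n:
--         if [i,False] not in visited:
--             return False
--         else :
--             visited[visited.index([i,False])][1]=True
--
--     return True
-- ===== SOURCE B (Python) =====
-- def isbelong(n, numbers):
--     avail = {}
--     for x in numbers:
--         avail[x] = avail.get(x, 0) + 1
--     need = {}
--     for c in str(n):
--         need[c] = need.get(c, 0) + 1
--     return all(k <= avail.get(c, 0) for c, k in need.items())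
-- ===== Notes on version B (the rewrite author's own statement) =====
-- stated objective: alternative
-- what changed: A repeatedly scans a marked copy of numbers for each character of str(n) (membership test plus list.index, with early return); B builds two frequency tables (of numbers and of the characters of str(n)) and returns whether every needed count is covered, in one aggregate comparison.
import Mathlib
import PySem

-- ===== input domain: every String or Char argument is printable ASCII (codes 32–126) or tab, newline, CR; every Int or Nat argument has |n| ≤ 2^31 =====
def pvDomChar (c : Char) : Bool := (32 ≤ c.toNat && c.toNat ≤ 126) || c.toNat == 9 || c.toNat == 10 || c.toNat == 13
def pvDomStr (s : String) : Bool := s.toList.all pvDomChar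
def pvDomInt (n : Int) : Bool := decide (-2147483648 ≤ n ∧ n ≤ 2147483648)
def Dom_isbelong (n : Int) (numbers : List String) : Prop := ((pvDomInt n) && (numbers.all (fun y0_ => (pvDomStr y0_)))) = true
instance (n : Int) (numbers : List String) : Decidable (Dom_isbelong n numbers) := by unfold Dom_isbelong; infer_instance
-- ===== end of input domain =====

-- B replaces A's per-character scan-and-mark loop over a marked copy of `numbers` by two
-- frequency tables (of numbers and of the characters of str(n)) compared in one aggregate pass.

-- iterating a Python string yields its characters as length-1 strings
def pvChr (c : Char) : String := String.ofList [c]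

-- ===== PORT A =====
-- the 'for i in n' loop; visited is the list of [number, flag] pairs.
-- 'if [i,False] not in visited: return False' and 'visited.index([i,False])' are the one
-- primitive index?: it is none exactly when the pair is not in visited (index?_eq_none_iff).
def isbelongLoopA : List Char → List (String × Bool) → Bool
  | [], _ => true
  | c :: rest, visited =>
    match PySem.List.index? visited (pvChr c, false) with
    | none => false
    | some i => isbelongLoopA rest (visited.set i (pvChr c, true))

def isbelong (n : Int) (numbers : List String) : Bool :=
  isbelongLoopA (PySem.Int.toStr n).toList (numbers.map (fun x => (x, false)))

-- ===== PORT B =====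
def isbelong_alt (n : Int) (numbers : List String) : Bool :=
  let avail : PySem.Dict String Int :=
    numbers.foldl (fun d x => d.insert x (d.getD x 0 + 1)) PySem.Dict.empty
  let need : PySem.Dict String Int :=
    ((PySem.Int.toStr n).toList.map pvChr).foldl
      (fun d c => d.insert c (d.getD c 0 + 1)) PySem.Dict.empty
  need.items.all (fun kv => kv.2 ≤ avail.getD kv.1 0)

-- ===== PRECONDITION & SPEC =====
def Spec_isbelong (n : Int) (numbers : List String) (out : Bool) : Prop := out = isbelong_alt n numbers
instance (n : Int) (numbers : List String) (out : Bool) : Decidable (Spec_isbelong n numbers out) := by unfold Spec_isbelong; infer_instance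

-- ===== CLAIM (what is proved, stated in full; the proofs are below) =====
def Claim_equal_isbelong : Prop := ∀ (n : Int) (numbers : List String), Dom_isbelong n numbers → Spec_isbelong n numbers (isbelong n numbers)

-- ===== LEMMAS AND PROOFS =====

lemma pvChr_inj {a b : Char} (h : pvChr a = pvChr b) : a = b := by
  have := congrArg String.toList h
  simp [pvChr] at this
  exact Char.ext (congrArg Char.val this)

lemma pvChr_ne {a b : Char} (h : a ≠ b) : pvChr a ≠ pvChr b :=
  fun he => h (pvChr_inj he)

-- marking one unmarked pair decrements its own free count and leaves every other free count alone
lemma count_mark (pre suf : List (String × Bool)) (c c' : Char) :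
    (pre ++ (pvChr c, false) :: suf).count (pvChr c', false)
      = (pre ++ (pvChr c, true) :: suf).count (pvChr c', false)
        + (if c' = c then 1 else 0) := by
  by_cases h : c' = c
  · subst h; simp [List.count_append]; omega
  · have hne : pvChr c ≠ pvChr c' := pvChr_ne (fun e => h e.symm)
    simp [List.count_append, hne, h]

-- A's loop succeeds iff every character's need is covered by the unmarked pairs
lemma loopA_char (cs : List Char) (visited : List (String × Bool)) :
    isbelongLoopA cs visited
      = decide (∀ c ∈ cs, cs.count c ≤ visited.count (pvChr c, false)) := by
  induction cs generalizing visited with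
  | nil => simp [isbelongLoopA]
  | cons c rest ih =>
    rw [isbelongLoopA]
    cases hidx : PySem.List.index? visited (pvChr c, false) with
    | none =>
      have hnm : (pvChr c, false) ∉ visited := (PySem.List.index?_eq_none_iff _ _).mp hidx
      have hcnt : visited.count (pvChr c, false) = 0 := List.count_eq_zero.mpr hnm
      have hno : ¬ (∀ c' ∈ c :: rest, (c :: rest).count c' ≤ visited.count (pvChr c', false)) := by
        intro h
        have := h c (by simp)
        rw [hcnt, List.count_cons_self] at this
        omega
      rw [eq_comm, decide_eq_false_iff_not]
      exact hno
    | some i =>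
      obtain ⟨pre, suf, hv, hlen, hnp⟩ := (PySem.List.index?_eq_some_iff _ _ _).mp hidx
      subst hv
      dsimp only
      have hset : (pre ++ (pvChr c, false) :: suf).set i (pvChr c, true)
          = pre ++ (pvChr c, true) :: suf := by
        subst hlen
        rw [List.set_append_right _ _ (le_refl _)]
        simp
      rw [ih, hset, decide_eq_decide]
      constructor
      · intro h c' hc'
        rw [count_mark]
        by_cases hcc : c' = c
        · subst hcc
          rw [List.count_cons_self, if_pos rfl]
          by_cases hmem : c' ∈ rest
          · have := h c' hmem; omega
          · have h0 : rest.count c' = 0 := List.count_eq_zero.mpr hmem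
            omega
        · rw [List.count_cons_of_ne (fun e => hcc e.symm), if_neg hcc]
          have hc'r : c' ∈ rest := by
            rcases List.mem_cons.mp hc' with h1 | h1
            · exact absurd h1 hcc
            · exact h1
          have := h c' hc'r; omega
      · intro h c' hc'
        have := h c' (List.mem_cons_of_mem c hc')
        rw [count_mark] at this
        by_cases hcc : c' = c
        · subst hcc
          rw [List.count_cons_self, if_pos rfl] at this
          omega
        · rw [List.count_cons_of_ne (fun e => hcc e.symm), if_neg hcc] at this
          omega

lemma pvChr_injective : Function.Injective pvChr := fun _ _ h => pvChr_inj h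

lemma count_map_pvChr (l : List Char) (c : Char) : (l.map pvChr).count (pvChr c) = l.count c :=
  List.count_map_of_injective _ _ pvChr_injective _

lemma count_map_pair (numbers : List String) (s : String) :
    (numbers.map (fun x => (x, false))).count (s, false) = numbers.count s :=
  List.count_map_of_injective _ _ (fun _ _ h => (Prod.mk.injEq _ _ _ _ ▸ h : _ ∧ _).1) _

-- B computes the same covering condition, via the two counters
lemma alt_char (n : Int) (numbers : List String) :
    isbelong_alt n numbers
      = decide (∀ c ∈ (PySem.Int.toStr n).toList,
          ((PySem.Int.toStr n).toList).count c ≤ numbers.count (pvChr c)) := by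
  unfold isbelong_alt
  simp only [PySem.Dict.foldl_insert_getD_add_one_eq_counter, PySem.Dict.items_counter,
    List.all_map, PySem.Dict.getD_counter]
  rw [Bool.eq_iff_iff]
  simp only [List.all_eq_true, decide_eq_true_eq, PySem.Set.mem_ofList, List.mem_map]
  constructor
  · intro h c hc
    have := h (pvChr c) ⟨c, hc, rfl⟩
    simp only [Function.comp_apply, decide_eq_true_eq, count_map_pvChr] at this
    exact_mod_cast this
  · rintro h s ⟨c, hc, rfl⟩
    simp only [Function.comp_apply, decide_eq_true_eq, count_map_pvChr]
    exact_mod_cast h c hc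

-- ===== VERDICT (by name: the statement is the Claim_ definition above) =====
theorem isbelong_spec : Claim_equal_isbelong := by
  intro n numbers _
  unfold Spec_isbelong
  rw [isbelong, loopA_char, alt_char]
  simp only [count_map_pair]
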